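-- pv_equiv track=rewrite | github.com/WallerTsai/OJ-Solution | leetcode-py/动态规划/经典线性DP/最长公共子序列(LCS)/No3628.py | calcInsertC
-- ===== SOURCE A (Python) =====
-- def calcInsertC(s: str) -> int:
--     cnt_t = s.count('T')  # s[i+1] 到 s[n-1] 的 'T' 的个数
--     cnt_l = 0  # s[0] 到 s[i] 的 'L' 的个数
--     res = 0
--     for c in s:
--         if c == 'T':
--             cnt_t -= 1
--         if c == 'L':
--             cnt_l += 1
--         res = max(res, cnt_l * cnt_t)
--     return res
-- ===== SOURCE B (Python) =====
-- def calcInsertC(s: str) -> int: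
--     n = len(s)
--     # pref_l[i] = number of 'L' in s[:i+1]
--     pref_l = [0] * n
--     acc = 0
--     for i, ch in enumerate(s):
--         if ch == 'L':
--             acc += 1
--         pref_l[i] = acc
--     # suf_t[i] = number of 'T' in s[i+1:]
--     suf_t = [0] * n
--     acc = 0
--     for i in range(n - 1, -1, -1):
--         suf_t[i] = acc
--         if s[i] == 'T':
--             acc += 1
--     best = 0
--     for p, t in zip(pref_l, suf_t):
--         if p * t > best:
--             best = p * t
--     return best
-- ===== Notes on version B (the rewrite author's own statement) =====
-- stated objective: alternative
-- what changed: Replaces A's single fused pass with two running counters by materialized prefix-L and suffix-T tables combined by a separate maximisation pass over their zip.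
import Mathlib
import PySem

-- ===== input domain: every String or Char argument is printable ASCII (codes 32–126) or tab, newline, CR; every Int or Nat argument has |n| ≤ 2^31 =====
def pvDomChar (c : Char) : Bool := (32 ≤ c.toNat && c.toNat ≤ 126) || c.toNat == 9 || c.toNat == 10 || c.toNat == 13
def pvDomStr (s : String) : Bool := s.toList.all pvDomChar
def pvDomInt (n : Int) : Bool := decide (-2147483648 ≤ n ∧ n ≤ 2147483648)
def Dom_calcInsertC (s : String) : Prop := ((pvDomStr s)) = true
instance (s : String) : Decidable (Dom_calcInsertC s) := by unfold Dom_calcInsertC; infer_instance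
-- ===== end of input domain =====

-- B materializes a prefix-L table and a suffix-T table and maximises their products in a separate pass (alternative decomposition, same O(n)).


-- ===== PORT A =====
-- the for-loop over s with running counters cnt_t, cnt_l and running max res
def calcA_go : List Char → Int → Int → Int → Int
  | [], _, _, res => res
  | c :: rest, cnt_t, cnt_l, res =>
    let cnt_t' := if c = 'T' then cnt_t - 1 else cnt_t
    let cnt_l' := if c = 'L' then cnt_l + 1 else cnt_l
    calcA_go rest cnt_t' cnt_l' (max res (cnt_l' * cnt_t'))

def calcInsertC (s : String) : Int :=
  calcA_go s.toList ((PySem.Str.count s "T" : Nat) : Int) 0 0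

-- ===== PORT B =====
-- forward pass: pref_l[i] = number of 'L' in s[:i+1]
def prefLs : List Char → Int → List Int
  | [], _ => []
  | ch :: rest, acc =>
    let acc' := if ch = 'L' then acc + 1 else acc
    acc' :: prefLs rest acc'

-- backward pass: returns (suf_t table, running acc = number of 'T' in the processed suffix)
def sufTs : List Char → List Int × Int
  | [] => ([], 0)
  | ch :: rest =>
    let p := sufTs rest
    (p.2 :: p.1, if ch = 'T' then p.2 + 1 else p.2)

def calcInsertC_alt (s : String) : Int :=
  let cs := s.toList
  ((prefLs cs 0).zip (sufTs cs).1).foldl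
    (fun best pt => if pt.1 * pt.2 > best then pt.1 * pt.2 else best) 0

-- ===== PRECONDITION & SPEC =====
def Spec_calcInsertC (s : String) (out : Int) : Prop := out = calcInsertC_alt s
instance (s : String) (out : Int) : Decidable (Spec_calcInsertC s out) := by unfold Spec_calcInsertC; infer_instance

-- ===== CLAIM (what is proved, stated in full; the proofs are below) =====
def Claim_equal_calcInsertC : Prop := ∀ (s : String), Dom_calcInsertC s → Spec_calcInsertC s (calcInsertC s)

-- ===== LEMMAS AND PROOFS =====

-- PySem.Chars.count with a single-character needle is List.count
theorem go_single (t : Char) : ∀ (cs : List Char) (acc : Nat),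
    PySem.Chars.count.go [t] cs.length cs acc = acc + cs.count t := by
  intro cs
  induction cs with
  | nil => intro acc; simp [PySem.Chars.count.go]
  | cons c rest ih =>
    intro acc
    rw [List.length_cons, PySem.Chars.count.go]
    simp only [List.isPrefixOf, List.length_singleton, List.drop_succ_cons, List.drop_zero]
    by_cases h : c = t
    · simp [h, ih, Nat.add_comm]
      omega
    · have h2 : (t == c) = false := by simp [Ne.symm h]
      simp [h2, ih, h]

theorem count_single (t : Char) (cs : List Char) :
    PySem.Chars.count cs [t] = cs.count t := by
  simpa using go_single t cs 0

-- the backward pass's final accumulator is the total T-count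
theorem sufTs_snd (cs : List Char) : (sufTs cs).2 = (cs.count 'T' : Int) := by
  induction cs with
  | nil => rfl
  | cons c rest ih =>
    by_cases h : c = 'T' <;> simp [sufTs, ih, h]

-- the running-max condition in B's third loop is max
theorem ite_gt_eq_max (a b : Int) : (if b > a then b else a) = max a b := by
  split_ifs <;> omega

-- core invariant: A's fused loop, started with the remaining T-count, equals
-- B's maximisation pass over the zipped tables
theorem main_inv (l : List Char) : ∀ (cl res : Int),
    calcA_go l (sufTs l).2 cl res
      = ((prefLs l cl).zip (sufTs l).1).foldl
          (fun best pt => if pt.1 * pt.2 > best then pt.1 * pt.2 else best) res := by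
  induction l with
  | nil => intro cl res; rfl
  | cons c rest ih =>
    intro cl res
    by_cases hT : c = 'T' <;> by_cases hL : c = 'L' <;>
      simp [calcA_go, prefLs, sufTs, hT, hL, List.foldl_cons, ite_gt_eq_max, ih]

-- ===== VERDICT (by name: the statement is the Claim_ definition above) =====
theorem calcInsertC_spec : Claim_equal_calcInsertC := by
  intro s _
  unfold Spec_calcInsertC calcInsertC calcInsertC_alt
  have hc : ((PySem.Str.count s "T" : Nat) : Int) = (sufTs s.toList).2 := by
    rw [PySem.Str.count, show ("T" : String).toList = ['T'] from rfl, count_single, sufTs_snd]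
  rw [hc, main_inv]
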